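-- pv_equiv track=rewrite | github.com/pkpio/codejam | round-1/fractiles/sol.py | get_artwork
-- ===== SOURCE A (Python) =====
-- def get_artwork(C, org_sq):
--     if C == 1:
--         return org_sq
--
--     # Get artwork of prev complexity
--     a_prev = get_artwork(C-1, org_sq)
--     a_gold = ''.join([str(1)]*len(org_sq))
--
--     # Build current artwork
--     a_cur = ''
--     for tile in a_prev:
--         if tile == '0':
--             a_cur += org_sq
--         else:
--             a_cur += a_gold
--
--     return a_cur
-- ===== SOURCE B (Python) =====
-- def get_artwork(C, org_sq):
--     gold = '1' * len(org_sq)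
--     art = org_sq
--     for _ in range(C - 1):
--         art = ''.join(org_sq if tile == '0' else gold for tile in art)
--     return art
-- ===== Notes on version B (the rewrite author's own statement) =====
-- stated objective: simpler
-- what changed: Replaced the C-deep linear recursion (building each level on the call stack with repeated string += concatenation) by a single bottom-up loop that rewrites the artwork C-1 times with one join per level.
import Mathlib
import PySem

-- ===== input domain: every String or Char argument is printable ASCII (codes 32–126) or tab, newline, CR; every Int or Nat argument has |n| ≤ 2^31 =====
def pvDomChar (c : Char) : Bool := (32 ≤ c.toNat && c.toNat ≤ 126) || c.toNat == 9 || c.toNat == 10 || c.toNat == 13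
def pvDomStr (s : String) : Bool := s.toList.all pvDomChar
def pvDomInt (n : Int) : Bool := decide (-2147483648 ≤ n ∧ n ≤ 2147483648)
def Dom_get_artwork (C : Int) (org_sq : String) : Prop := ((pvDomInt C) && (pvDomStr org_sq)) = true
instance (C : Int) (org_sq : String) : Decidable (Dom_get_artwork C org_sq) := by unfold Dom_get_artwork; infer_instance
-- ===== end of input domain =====

-- B replaces A's C-deep linear recursion by a single bottom-up rewriting loop (simpler, constant stack);
-- return values are identical for every C ≥ 1 (for C < 1 A raises RecursionError, B returns org_sq).

-- ===== PORT A =====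
-- Literal port of A's recursion. A never reaches its base case for C < 1 (RecursionError in Python);
-- the totalizing guard 'C ≤ 1' returns org_sq there — those inputs are outside Pre_get_artwork.
-- String concatenation is done on List Char (Lean's String.append is kernel-opaque), wrapped by String.ofList at the end.
def get_artwork (C : Int) (org_sq : String) : String :=
  if C ≤ 1 then org_sq
  else
    let a_prev := get_artwork (C - 1) org_sq
    let a_gold := List.replicate org_sq.toList.length '1'
    String.ofList (a_prev.toList.foldl
      (fun a_cur tile => a_cur ++ (if tile = '0' then org_sq.toList else a_gold)) [])
termination_by C.toNat
decreasing_by omega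

-- ===== PORT B =====
def get_artwork_alt (C : Int) (org_sq : String) : String :=
  let gold := List.replicate org_sq.toList.length '1'
  (PySem.List.pyRange 0 (C - 1) 1).foldl
    (fun art _ => String.ofList (art.toList.flatMap
      (fun tile => if tile = '0' then org_sq.toList else gold)))
    org_sq

-- ===== PRECONDITION & SPEC =====
-- Pre_ excludes C < 1, on which A's recursion never reaches its base case and raises RecursionError.
def Pre_get_artwork (C : Int) (org_sq : String) : Prop := 1 ≤ C
instance (C : Int) (org_sq : String) : Decidable (Pre_get_artwork C org_sq) := by unfold Pre_get_artwork; infer_instance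
def pvWitness_get_artwork : Int × String := (3, "01x")

def Spec_get_artwork (C : Int) (org_sq : String) (out : String) : Prop := out = get_artwork_alt C org_sq
instance (C : Int) (org_sq : String) (out : String) : Decidable (Spec_get_artwork C org_sq out) := by unfold Spec_get_artwork; infer_instance

-- ===== CLAIM (what is proved, stated in full; the proofs are below) =====
def Claim_equal_get_artwork : Prop := ∀ (C : Int) (org_sq : String), Dom_get_artwork C org_sq → Pre_get_artwork C org_sq → Spec_get_artwork C org_sq (get_artwork C org_sq)

-- ===== LEMMAS AND PROOFS =====

-- one rewriting level, on char lists
def pvStep (s : List Char) (l : List Char) : List Char :=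
  l.flatMap (fun tile => if tile = '0' then s else List.replicate s.length '1')

theorem pvA_iter (n : Nat) (s : String) :
    get_artwork ((n : Int) + 1) s = String.ofList ((pvStep s.toList)^[n] s.toList) := by
  induction n with
  | zero => simp [get_artwork, String.ofList_toList]
  | succ m ih =>
      rw [get_artwork]
      push_cast
      have h1 : ¬ ((m : Int) + 1 + 1 ≤ 1) := by omega
      rw [if_neg h1]
      have h2 : ((m : Int) + 1 + 1) - 1 = (m : Int) + 1 := by ring
      rw [h2, ih, Function.iterate_succ_apply']
      simp [pvStep, String.toList_ofList, List.flatMap_def]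

theorem pvB_iter (n : Nat) (s : String) (init : List Char) :
    ((List.range n).foldl
      (fun art _ => String.ofList (art.toList.flatMap
        (fun tile => if tile = '0' then s.toList else List.replicate s.toList.length '1')))
      (String.ofList init)).toList = (pvStep s.toList)^[n] init := by
  induction n generalizing init with
  | zero => simp [String.toList_ofList]
  | succ m ih =>
      rw [List.range_succ_eq_map]
      simp only [List.foldl_cons, List.foldl_map, String.toList_ofList]
      rw [ih, Function.iterate_succ_apply]
      rfl

-- ===== VERDICT (by name: the statement is the Claim_ definition above) =====
theorem get_artwork_spec : Claim_equal_get_artwork := by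
  intro C s _ hPre
  unfold Spec_get_artwork Pre_get_artwork at *
  have hC : C = ((C - 1).toNat : Int) + 1 := by omega
  rw [hC, pvA_iter]
  unfold get_artwork_alt
  rw [PySem.List.pyRange_one]
  have h3 : (((((C - 1).toNat : Int) + 1) - 1) - 0).toNat = (C - 1).toNat := by omega
  rw [h3, List.foldl_map]
  have hB := pvB_iter (C - 1).toNat s s.toList
  rw [String.ofList_toList] at hB
  rw [← hB, String.ofList_toList]
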